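-- pv_equiv track=rewrite | github.com/alex3287/python-2019 | codewars/level_4/routeCalculator.py | coock_string
-- ===== SOURCE A (Python) =====
-- def coock_string(expression):
--     result = ''
--     for i in expression:
--         if i in '-+*$':
--             result += ' ' + i + ' '
--         else:
--             result += i
--     return result
-- ===== SOURCE B (Python) =====
-- _TABLE = {ord(c): f' {c} ' for c in '-+*$'}
--
-- def coock_string(expression):
--     return expression.translate(_TABLE)
-- ===== Notes on version B (the rewrite author's own statement) =====
-- stated objective: idiomatic
-- what changed: Replaces the explicit character loop with string accumulation by a precomputed str.translate table mapping each operator ordinal to its spaced form.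
import Mathlib
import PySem

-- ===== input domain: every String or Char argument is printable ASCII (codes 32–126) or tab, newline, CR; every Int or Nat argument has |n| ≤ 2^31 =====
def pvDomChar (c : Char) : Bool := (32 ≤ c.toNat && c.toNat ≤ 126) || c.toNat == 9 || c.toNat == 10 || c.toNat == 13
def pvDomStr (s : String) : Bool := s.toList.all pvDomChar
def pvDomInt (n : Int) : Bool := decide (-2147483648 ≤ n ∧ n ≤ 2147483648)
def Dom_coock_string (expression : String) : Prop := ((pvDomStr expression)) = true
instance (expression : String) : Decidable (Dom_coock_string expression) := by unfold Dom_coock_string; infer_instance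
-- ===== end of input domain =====

-- B replaces A's explicit accumulation loop with a precomputed translation table applied per character (str.translate); equivalence of the two proved on all inputs.

-- ===== PORT A =====
-- 'for i in expression: if i in "-+*$": result += " "+i+" " else: result += i'
def coock_string (expression : String) : String :=
  String.mk (expression.toList.foldl
    (fun result i => if i ∈ "-+*$".toList then result ++ [' ', i, ' '] else result ++ [i]) [])

-- ===== PORT B =====
-- the translate table {ord(c): f' {c} ' for c in '-+*$'}
def pvTranslateTable : PySem.Dict Char (List Char) :=
  PySem.Dict.ofList ("-+*$".toList.map (fun c => (c, [' ', c, ' '])))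

-- 'expression.translate(table)': each char is replaced by its table entry, or kept
def coock_string_alt (expression : String) : String :=
  String.mk (expression.toList.flatMap (fun c => (pvTranslateTable.get? c).getD [c]))

-- ===== PRECONDITION & SPEC =====
def Spec_coock_string (expression : String) (out : String) : Prop := out = coock_string_alt expression
instance (expression : String) (out : String) : Decidable (Spec_coock_string expression out) := by unfold Spec_coock_string; infer_instance

-- ===== CLAIM (what is proved, stated in full; the proofs are below) =====
def Claim_equal_coock_string : Prop := ∀ (expression : String), Dom_coock_string expression → Spec_coock_string expression (coock_string expression)

-- ===== LEMMAS AND PROOFS =====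
theorem pv_table_eq : pvTranslateTable = PySem.Dict.mk
    [('-', [' ', '-', ' ']), ('+', [' ', '+', ' ']), ('*', [' ', '*', ' ']), ('$', [' ', '$', ' '])] := by
  decide

theorem pv_char_eq (c : Char) :
    (if c ∈ "-+*$".toList then [' ', c, ' '] else [c])
      = ((pvTranslateTable.get? c).getD [c]) := by
  by_cases h1 : c = '-'
  · subst h1; decide
  by_cases h2 : c = '+'
  · subst h2; decide
  by_cases h3 : c = '*'
  · subst h3; decide
  by_cases h4 : c = '$'
  · subst h4; decide
  have g1 : ¬('-' = c) := fun h => h1 h.symm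
  have g2 : ¬('+' = c) := fun h => h2 h.symm
  have g3 : ¬('*' = c) := fun h => h3 h.symm
  have g4 : ¬('$' = c) := fun h => h4 h.symm
  rw [pv_table_eq, show "-+*$".toList = ['-', '+', '*', '$'] from rfl]
  simp [PySem.Dict.get?, g1, g2, g3, g4, h1, h2, h3, h4]

theorem pv_loop (l : List Char) (acc : List Char) :
    l.foldl (fun result i => if i ∈ "-+*$".toList then result ++ [' ', i, ' '] else result ++ [i]) acc
      = acc ++ l.flatMap (fun c => (pvTranslateTable.get? c).getD [c]) := by
  induction l generalizing acc with
  | nil => simp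
  | cons c l ih =>
    simp only [List.foldl_cons, List.flatMap_cons, ih]
    rw [← pv_char_eq c]
    split_ifs <;> simp

-- ===== VERDICT (by name: the statement is the Claim_ definition above) =====
theorem coock_string_spec : Claim_equal_coock_string := by
  intro e _
  unfold Spec_coock_string coock_string coock_string_alt
  rw [pv_loop, List.nil_append]
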